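-- pv_equiv track=rewrite | github.com/matcbv/Python3 | Curso_Udemy/exercicios_pratica/exercicio_01.py | checar_valores
-- ===== SOURCE A (Python) =====
-- def checar_valores(valores):
--     cont = 0
--     for num in valores:
--         num = int(num)
--         if num % 2 == 0:
--             cont += 1
--     if cont == len(valores):
--         return 'par'
--     elif cont == 0:
--         return 'impar'
--     return 'impar e par'
-- ===== SOURCE B (Python) =====
-- def checar_valores(valores):
--     parities = {int(n) % 2 for n in valores}
--     if 1 not in parities:
--         return 'par'
--     if 0 not in parities:
--         return 'impar'
--     return 'impar e par'
-- ===== Notes on version B (the rewrite author's own statement) =====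
-- stated objective: simpler
-- what changed: B collects the set of parities n % 2 in one comprehension and classifies by membership of 0/1 in that set, instead of A's running counter of evens compared against len(valores).
import Mathlib
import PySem

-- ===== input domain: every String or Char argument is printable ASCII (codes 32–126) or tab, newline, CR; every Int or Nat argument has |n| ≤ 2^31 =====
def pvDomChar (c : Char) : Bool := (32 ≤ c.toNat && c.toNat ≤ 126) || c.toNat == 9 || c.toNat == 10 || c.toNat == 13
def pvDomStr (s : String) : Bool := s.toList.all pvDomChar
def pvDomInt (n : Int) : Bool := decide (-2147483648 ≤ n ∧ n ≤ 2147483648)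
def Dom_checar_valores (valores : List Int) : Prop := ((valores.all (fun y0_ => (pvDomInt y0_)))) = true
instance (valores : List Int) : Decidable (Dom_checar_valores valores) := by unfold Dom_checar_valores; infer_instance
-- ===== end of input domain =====

-- B classifies by the set of parities {n % 2} (membership of 0/1) instead of A's counter of evens compared to the length; objective: simpler.


-- ===== PORT A =====
-- cont = 0; for num in valores: if int(num) % 2 == 0: cont += 1; then compare cont with len
def checar_valores (valores : List Int) : String :=
  let cont : Int := valores.foldl (fun cont num => if PySem.Int.mod num 2 = 0 then cont + 1 else cont) 0
  if cont = (valores.length : Int) then "par"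
  else if cont = 0 then "impar"
  else "impar e par"

-- ===== PORT B =====
-- parities = {int(n) % 2 for n in valores}; classify by membership of 1 and 0
def checar_valores_alt (valores : List Int) : String :=
  let parities : PySem.Set Int := PySem.Set.ofList (valores.map (fun n => PySem.Int.mod n 2))
  if ¬ (PySem.Set.contains parities 1 = true) then "par"
  else if ¬ (PySem.Set.contains parities 0 = true) then "impar"
  else "impar e par"

-- ===== PRECONDITION & SPEC =====
def Spec_checar_valores (valores : List Int) (out : String) : Prop := out = checar_valores_alt valores
instance (valores : List Int) (out : String) : Decidable (Spec_checar_valores valores out) := by unfold Spec_checar_valores; infer_instance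

-- ===== CLAIM (what is proved, stated in full; the proofs are below) =====
def Claim_equal_checar_valores : Prop := ∀ (valores : List Int), Dom_checar_valores valores → Spec_checar_valores valores (checar_valores valores)

-- ===== LEMMAS AND PROOFS =====

theorem pv_mod_two (n : Int) : PySem.Int.mod n 2 = 0 ∨ PySem.Int.mod n 2 = 1 := by
  have h0 := PySem.Int.mod_nonneg n (b := 2) (by norm_num)
  have h1 := PySem.Int.mod_lt n (b := 2) (by norm_num)
  omega

theorem pv_cont_eq_countP (valores : List Int) (c : Int) :
    valores.foldl (fun cont num => if PySem.Int.mod num 2 = 0 then cont + 1 else cont) c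
      = c + (valores.countP (fun num => decide (PySem.Int.mod num 2 = 0)) : Int) := by
  induction valores generalizing c with
  | nil => simp
  | cons x xs ih =>
    rw [List.foldl_cons, List.countP_cons, ih]
    by_cases h : PySem.Int.mod x 2 = 0
    · rw [if_pos h, if_pos (decide_eq_true h)]
      push_cast; ring
    · rw [if_neg h, if_neg (fun hc => h (of_decide_eq_true hc))]
      push_cast; ring

theorem pv_contains_one (valores : List Int) :
    PySem.Set.contains (PySem.Set.ofList (valores.map (fun n => PySem.Int.mod n 2))) 1 = true
      ↔ ∃ n ∈ valores, PySem.Int.mod n 2 = 1 := by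
  rw [PySem.Set.contains_iff, PySem.Set.mem_ofList, List.mem_map]

theorem pv_contains_zero (valores : List Int) :
    PySem.Set.contains (PySem.Set.ofList (valores.map (fun n => PySem.Int.mod n 2))) 0 = true
      ↔ ∃ n ∈ valores, PySem.Int.mod n 2 = 0 := by
  rw [PySem.Set.contains_iff, PySem.Set.mem_ofList, List.mem_map]

-- ===== VERDICT (by name: the statement is the Claim_ definition above) =====
theorem checar_valores_spec : Claim_equal_checar_valores := by
  intro valores _
  unfold Spec_checar_valores checar_valores checar_valores_alt
  simp only [pv_cont_eq_countP, zero_add]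
  by_cases h1 : ∃ n ∈ valores, PySem.Int.mod n 2 = 1
  · have hlt : valores.countP (fun num => decide (PySem.Int.mod num 2 = 0)) < valores.length := by
      apply Nat.lt_of_le_of_ne (List.countP_le_length)
      intro h
      obtain ⟨n, hn, hmod⟩ := h1
      have := List.countP_eq_length.mp h n hn
      rw [decide_eq_true_eq] at this
      omega
    by_cases h0 : ∃ n ∈ valores, PySem.Int.mod n 2 = 0
    · have hpos : 0 < valores.countP (fun num => decide (PySem.Int.mod num 2 = 0)) := by
        obtain ⟨n, hn, hmod⟩ := h0
        exact List.countP_pos_iff.mpr ⟨n, hn, decide_eq_true hmod⟩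
      rw [if_neg (fun h => Nat.ne_of_lt hlt (Nat.cast_inj.mp h)),
          if_neg (fun h => Nat.pos_iff_ne_zero.mp hpos (Nat.cast_eq_zero.mp h)),
          if_neg (not_not_intro ((pv_contains_one valores).mpr h1)),
          if_neg (not_not_intro ((pv_contains_zero valores).mpr h0))]
    · have hz : valores.countP (fun num => decide (PySem.Int.mod num 2 = 0)) = 0 := by
        rw [List.countP_eq_zero]
        intro n hn
        rcases pv_mod_two n with h | h
        · exact absurd ⟨n, hn, h⟩ h0
        · simp only [decide_eq_true_eq]; omega
      have hne : 0 < valores.length := by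
        obtain ⟨n, hn, _⟩ := h1
        exact List.length_pos_iff.mpr (List.ne_nil_of_mem hn)
      rw [hz,
          if_neg (fun h => Nat.pos_iff_ne_zero.mp hne (Nat.cast_inj.mp h).symm),
          if_pos (by norm_num),
          if_neg (not_not_intro ((pv_contains_one valores).mpr h1)),
          if_pos (show ¬ _ = true from fun hc => h0 ((pv_contains_zero valores).mp hc))]
  · have hall : ∀ n ∈ valores, PySem.Int.mod n 2 = 0 := by
      intro n hn
      rcases pv_mod_two n with h | h
      · exact h
      · exact absurd ⟨n, hn, h⟩ h1
    have hlen : valores.countP (fun num => decide (PySem.Int.mod num 2 = 0)) = valores.length := by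
      rw [List.countP_eq_length]
      intro n hn; exact decide_eq_true (hall n hn)
    rw [hlen, if_pos rfl,
        if_pos (show ¬ _ = true from fun hc => h1 ((pv_contains_one valores).mp hc))]
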